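-- pv_equiv track=rewrite | github.com/heineman/coding-interview-prep | task_solutions.py | reduce_tasks_min
-- ===== SOURCE A (Python) =====
-- def reduce_tasks_min(data):
--     result = {}                      # Use dict (task) -> MinTime
--     for d in data:
--         key = d[1]                   # Extract task to use as key
--         if key not in result:
--             result[key] = d          # First time? Record value
--         else:
--             if d[2] < result[key][2]:# Update if smaller than recorded
--                 result[key] = d
--
--     return result.values()
-- ===== SOURCE B (Python) =====
-- def reduce_tasks_min(data):
--     # Phase 1: group all records by task key (insertion order preserved).
--     groups = {}
--     for d in data:
--         groups[d[1]] = groups.get(d[1], []) + [d]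
--     # Phase 2: reduce each group to its first minimum-time record.
--     return [min(g, key=lambda r: r[2]) for g in groups.values()]
-- ===== Notes on version B (the rewrite author's own statement) =====
-- stated objective: alternative
-- what changed: B replaces A's reduce-while-scanning single pass (dict holding the running minimum per key) with a two-phase collect-then-reduce: first group all records by task key into lists, then pick each group's first minimum-time record with min(key=...).
import Mathlib
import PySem

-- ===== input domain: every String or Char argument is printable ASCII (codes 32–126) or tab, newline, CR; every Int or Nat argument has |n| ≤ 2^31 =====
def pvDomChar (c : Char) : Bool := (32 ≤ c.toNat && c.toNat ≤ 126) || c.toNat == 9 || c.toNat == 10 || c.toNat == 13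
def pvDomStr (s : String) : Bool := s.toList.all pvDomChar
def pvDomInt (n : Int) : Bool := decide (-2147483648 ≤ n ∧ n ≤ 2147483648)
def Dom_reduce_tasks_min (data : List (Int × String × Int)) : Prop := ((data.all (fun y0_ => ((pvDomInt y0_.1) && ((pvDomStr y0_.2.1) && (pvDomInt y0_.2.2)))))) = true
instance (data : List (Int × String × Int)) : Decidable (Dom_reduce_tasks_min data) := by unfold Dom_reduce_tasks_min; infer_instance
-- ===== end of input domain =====

-- B replaces A's reduce-while-scanning single pass with a two-phase collect-then-reduce
-- (group records by key, then take each group's first minimum-time record); alternative, same result.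


-- ===== PORT A =====
-- A-side helper: the loop body of A's single pass (keep the running minimum per key)
def pvStepA (result : PySem.Dict String (Int × String × Int)) (d : Int × String × Int) :
    PySem.Dict String (Int × String × Int) :=
  match result.get? d.2.1 with
  | none => result.insert d.2.1 d              -- key not in result: record value
  | some cur => if d.2.2 < cur.2.2 then result.insert d.2.1 d else result

def reduce_tasks_min (data : List (Int × String × Int)) : List (Int × String × Int) :=
  (data.foldl pvStepA PySem.Dict.empty).values

-- ===== PORT B =====
-- B-side helper: the grouping loop body  groups[d[1]] = groups.get(d[1], []) + [d]
def pvStepB (groups : PySem.Dict String (List (Int × String × Int))) (d : Int × String × Int) :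
    PySem.Dict String (List (Int × String × Int)) :=
  groups.modify d.2.1 [] (fun lst => lst ++ [d])

def reduce_tasks_min_alt (data : List (Int × String × Int)) : List (Int × String × Int) :=
  let groups := data.foldl pvStepB PySem.Dict.empty
  -- min(g, key=lambda r: r[2]); min? is none only for an empty list, and no group is empty
  groups.values.filterMap (fun g => PySem.List.min? g (fun r => r.2.2))

-- ===== PRECONDITION & SPEC =====
def Spec_reduce_tasks_min (data : List (Int × String × Int)) (out : List (Int × String × Int)) : Prop := out = reduce_tasks_min_alt data
instance (data : List (Int × String × Int)) (out : List (Int × String × Int)) : Decidable (Spec_reduce_tasks_min data out) := by unfold Spec_reduce_tasks_min; infer_instance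

-- ===== CLAIM (what is proved, stated in full; the proofs are below) =====
def Claim_equal_reduce_tasks_min : Prop := ∀ (data : List (Int × String × Int)), Dom_reduce_tasks_min data → Spec_reduce_tasks_min data (reduce_tasks_min data)

-- ===== LEMMAS AND PROOFS =====

-- first minimum-time record of a group, with a junk default (groups are never empty)
def pvMin (lst : List (Int × String × Int)) : Int × String × Int :=
  (PySem.List.min? lst (fun r => r.2.2)).getD (0, "", 0)

-- B's group entry mapped to A's running-minimum entry
def pvF (p : String × List (Int × String × Int)) : String × (Int × String × Int) :=
  (p.1, pvMin p.2)

lemma pvMin_singleton (d : Int × String × Int) : pvMin [d] = d := by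
  simp [pvMin, PySem.List.min?]

lemma pvMin_append (lst : List (Int × String × Int)) (d : Int × String × Int) (h : lst ≠ []) :
    pvMin (lst ++ [d]) = if d.2.2 < (pvMin lst).2.2 then d else pvMin lst := by
  obtain ⟨m, hm⟩ : ∃ m, PySem.List.min? lst (fun r => r.2.2) = some m := by
    cases h' : PySem.List.min? lst (fun r => r.2.2) with
    | none => exact absurd ((PySem.List.min?_eq_none_iff _ _).mp h') h
    | some m => exact ⟨m, rfl⟩
  have hstep : PySem.List.min? (lst ++ [d]) (fun r => r.2.2)
      = if d.2.2 < m.2.2 then some d else some m := by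
    simp only [PySem.List.min?, List.foldl_append] at hm ⊢
    rw [hm]
    rfl
  simp only [pvMin, hm, hstep, Option.getD_some]
  split_ifs <;> rfl

-- A's dict lookup through the invariant: r.get? k = (g.get? k).map pvMin
lemma get?_map_pvF (g : PySem.Dict String (List (Int × String × Int))) (k : String) :
    (PySem.Dict.mk (g.items.map pvF)).get? k = (g.get? k).map pvMin := by
  simp only [PySem.Dict.get?, List.find?_map]
  have : (fun p : String × (Int × String × Int) => p.1 == k) ∘ pvF
      = (fun p : String × List (Int × String × Int) => p.1 == k) := rfl
  rw [this]
  cases List.find? (fun p => p.1 == k) g.1 <;> rfl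

-- one step of both loops preserves the invariant
lemma pvStep_pres (r : PySem.Dict String (Int × String × Int))
    (g : PySem.Dict String (List (Int × String × Int))) (d : Int × String × Int)
    (hnd : g.keys.Nodup) (hne : ∀ p ∈ g.items, p.2 ≠ [])
    (hr : r.items = g.items.map pvF) :
    (pvStepA r d).items = (pvStepB g d).items.map pvF
      ∧ (pvStepB g d).keys.Nodup
      ∧ ∀ p ∈ (pvStepB g d).items, p.2 ≠ [] := by
  have hrg : r = PySem.Dict.mk (g.items.map pvF) := by
    cases r with
    | mk items => simpa [PySem.Dict.items] using hr
  subst hrg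
  have hget := get?_map_pvF g d.2.1
  refine ⟨?_, PySem.Dict.nodup_keys_insert _ _ _ hnd, ?_⟩
  · -- items invariant
    cases hc : g.get? d.2.1 with
    | none =>
      have hgc : g.contains d.2.1 = false := by
        rw [PySem.Dict.contains_eq_isSome_get?, hc]; rfl
      have hrc : (PySem.Dict.mk (g.items.map pvF)).contains d.2.1 = false := by
        rw [PySem.Dict.contains_eq_isSome_get?, hget, hc]; rfl
      simp only [pvStepA, pvStepB, PySem.Dict.modify, hget, hc, Option.map_none]
      rw [PySem.Dict.items_insert_of_not_contains _ _ hrc,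
          PySem.Dict.items_insert_of_not_contains _ _ hgc,
          PySem.Dict.getD_eq_get?_getD, hc]
      simp [pvF, pvMin_singleton]
    | some lst =>
      have hlst : lst ≠ [] :=
        hne (d.2.1, lst) (PySem.Dict.mem_items_of_get?_eq_some g hc)
      have hgc : g.contains d.2.1 = true := by
        rw [PySem.Dict.contains_eq_isSome_get?, hc]; rfl
      have hrc : (PySem.Dict.mk (g.items.map pvF)).contains d.2.1 = true := by
        rw [PySem.Dict.contains_eq_isSome_get?, hget, hc]; rfl
      have hgv : g.getD d.2.1 [] = lst := by rw [PySem.Dict.getD_eq_get?_getD, hc]; rfl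
      have hmin := pvMin_append lst d hlst
      simp only [pvStepA, pvStepB, PySem.Dict.modify, hget, hc, Option.map_some, hgv]
      by_cases hlt : d.2.2 < (pvMin lst).2.2
      · simp only [hlt, if_pos]
        rw [PySem.Dict.items_insert_of_contains _ _ hrc,
            PySem.Dict.items_insert_of_contains _ _ hgc]
        simp only [List.map_map]
        apply List.map_congr_left
        intro p _
        by_cases hk : (p.1 == d.2.1) = true
        · simp [Function.comp, hk, pvF, hmin, hlt]
        · simp [Function.comp, hk, pvF]
      · simp only [hlt, if_false]
        rw [PySem.Dict.items_insert_of_contains _ _ hgc]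
        simp only [List.map_map]
        apply List.map_congr_left
        intro p hp
        by_cases hk : (p.1 == d.2.1) = true
        · have hk' : p.1 = d.2.1 := by simpa using hk
          have h72 : p.2 = lst := by
            have hg := PySem.Dict.get?_of_mem_items g (k := p.1) (v := p.2)
              (by simpa using hp) hnd
            rw [hk', hc] at hg
            exact Option.some_injective _ hg.symm
          simp [Function.comp, pvF, h72, hmin, hlt, hk']
        · simp [Function.comp, hk, pvF]
  · -- groups stay nonempty
    intro p hp
    have := (PySem.Dict.mem_items_insert g d.2.1 (g.getD d.2.1 [] ++ [d]) p).mp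
      (by simpa [pvStepB, PySem.Dict.modify] using hp)
    rcases this with h | ⟨h, _⟩
    · subst h; simp
    · exact hne p h

-- the whole loop preserves the invariant
lemma pvLoop_inv (data : List (Int × String × Int)) :
    ∀ (r : PySem.Dict String (Int × String × Int))
      (g : PySem.Dict String (List (Int × String × Int))),
      g.keys.Nodup → (∀ p ∈ g.items, p.2 ≠ []) → r.items = g.items.map pvF →
      (data.foldl pvStepA r).items = (data.foldl pvStepB g).items.map pvF
        ∧ (data.foldl pvStepB g).keys.Nodup
        ∧ ∀ p ∈ (data.foldl pvStepB g).items, p.2 ≠ [] := by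
  induction data with
  | nil => intro r g hnd hne hr; exact ⟨hr, hnd, hne⟩
  | cons d t ih =>
    intro r g hnd hne hr
    obtain ⟨h1, h2, h3⟩ := pvStep_pres r g d hnd hne hr
    simpa using ih (pvStepA r d) (pvStepB g d) h2 h3 h1

-- ===== VERDICT (by name: the statement is the Claim_ definition above) =====
theorem reduce_tasks_min_spec : Claim_equal_reduce_tasks_min := by
  intro data _
  unfold Spec_reduce_tasks_min reduce_tasks_min reduce_tasks_min_alt
  obtain ⟨h1, _, h3⟩ := pvLoop_inv data PySem.Dict.empty PySem.Dict.empty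
    (by simp [PySem.Dict.empty, PySem.Dict.keys]) (by simp [PySem.Dict.empty])
    (by simp [PySem.Dict.empty])
  simp only [PySem.Dict.values, h1, List.map_map, List.filterMap_map]
  rw [List.filterMap_congr (g := some ∘ ((fun x => x.2) ∘ pvF)) ?_]
  · rw [List.filterMap_eq_map]
  · intro p hp
    cases h' : PySem.List.min? p.2 (fun r => r.2.2) with
    | none => exact absurd ((PySem.List.min?_eq_none_iff _ _).mp h') (h3 p hp)
    | some m => simp [Function.comp, pvF, pvMin, h']
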